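-- pv_equiv track=rewrite | github.com/I-AM-Fission/Quantum_password_manager-generator | Quantum_Protected_Password_Generator.py | _needed_clean_bits
-- ===== SOURCE A (Python) =====
-- import string
--
-- LOWER = string.ascii_lowercase
--
-- UPPER = string.ascii_uppercase
--
-- DIGITS = string.digits
--
-- SYMBOLS = "!@#$&_-?"
--
-- def _needed_clean_bits(length, with_symbols):
--     alphabet_len = len(LOWER + UPPER + DIGITS + (SYMBOLS if with_symbols else ""))
--     nbits = (alphabet_len - 1).bit_length()
--     req_count = 3 + (1 if with_symbols else 0)
--     total = max(length, req_count)
--     shuffle_bits = sum(((i + 1) - 1).bit_length() for i in range(1, total))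
--     pick_bits = total * nbits + req_count * 6
--     return pick_bits + shuffle_bits + 256
-- ===== SOURCE B (Python) =====
-- def _needed_clean_bits(length, with_symbols):
--     # Closed-form: bit-lengths of 1..total-1 grouped by magnitude range (O(log total)).
--     nbits, req_count = (7, 4) if with_symbols else (6, 3)
--     total = max(length, req_count)
--     n = total - 1
--     s = 0
--     for k in range(1, n.bit_length() + 1):
--         lo = 1 << (k - 1)
--         hi = min(n, (1 << k) - 1)
--         s += k * (hi - lo + 1)
--     return total * nbits + req_count * 6 + s + 256
-- ===== Notes on version B (the rewrite author's own statement) =====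
-- stated objective: faster
-- what changed: Replaces the O(n) per-index sum of bit lengths over range(1, total) with a closed-form sum grouped by bit-length bands [2^(k-1), 2^k-1], looping only over the O(log n) bands.
import Mathlib
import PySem

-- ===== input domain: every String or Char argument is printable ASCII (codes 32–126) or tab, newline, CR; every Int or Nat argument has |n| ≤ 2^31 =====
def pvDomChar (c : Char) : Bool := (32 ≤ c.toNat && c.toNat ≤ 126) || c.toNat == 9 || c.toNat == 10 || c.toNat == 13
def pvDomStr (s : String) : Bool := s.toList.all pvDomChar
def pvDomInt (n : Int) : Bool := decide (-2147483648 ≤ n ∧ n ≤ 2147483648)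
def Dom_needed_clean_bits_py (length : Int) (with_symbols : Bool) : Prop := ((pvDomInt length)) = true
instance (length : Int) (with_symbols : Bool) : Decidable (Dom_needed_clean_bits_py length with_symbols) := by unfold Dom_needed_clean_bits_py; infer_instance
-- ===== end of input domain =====

-- B replaces A's linear-time sum of bit lengths by a closed-form sum over O(log n) bit-length bands.

-- ===== PORT A =====
def needed_clean_bits_py (length : Int) (with_symbols : Bool) : Int :=
  let alphabet_len : Int := PySem.Str.len
    ("abcdefghijklmnopqrstuvwxyz" ++ "ABCDEFGHIJKLMNOPQRSTUVWXYZ" ++ "0123456789"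
      ++ (if with_symbols then "!@#$&_-?" else ""))
  let nbits : Int := (PySem.Int.bitLength (alphabet_len - 1) : Int)
  let req_count : Int := 3 + (if with_symbols then 1 else 0)
  let total : Int := max length req_count
  let shuffle_bits : Int :=
    (PySem.List.pyRange 1 total 1).foldl
      (fun acc i => acc + (PySem.Int.bitLength ((i + 1) - 1) : Int)) 0
  let pick_bits : Int := total * nbits + req_count * 6
  pick_bits + shuffle_bits + 256

-- ===== PORT B =====
def needed_clean_bits_py_alt (length : Int) (with_symbols : Bool) : Int :=
  let nbits : Int := if with_symbols then 7 else 6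
  let req_count : Int := if with_symbols then 4 else 3
  let total : Int := max length req_count
  let n : Int := total - 1
  -- '1 << (k-1)' / '1 << k' ported as 2 ^ (k-1).toNat / 2 ^ k.toNat (exact: k ≥ 1 in the range)
  let s : Int :=
    (PySem.List.pyRange 1 ((PySem.Int.bitLength n : Int) + 1) 1).foldl
      (fun acc k => acc + k * (min n (2 ^ k.toNat - 1) - 2 ^ (k - 1).toNat + 1)) 0
  total * nbits + req_count * 6 + s + 256

-- ===== PRECONDITION & SPEC =====
def Spec_needed_clean_bits_py (length : Int) (with_symbols : Bool) (out : Int) : Prop := out = needed_clean_bits_py_alt length with_symbols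
instance (length : Int) (with_symbols : Bool) (out : Int) : Decidable (Spec_needed_clean_bits_py length with_symbols out) := by unfold Spec_needed_clean_bits_py; infer_instance

-- ===== CLAIM (what is proved, stated in full; the proofs are below) =====
def Claim_equal_needed_clean_bits_py : Prop := ∀ (length : Int) (with_symbols : Bool), Dom_needed_clean_bits_py length with_symbols → Spec_needed_clean_bits_py length with_symbols (needed_clean_bits_py length with_symbols)

-- ===== LEMMAS AND PROOFS =====

-- bit length of a natural number, as the ports use it
def pvBL (n : Nat) : Nat := PySem.Int.bitLength (n : Int)

theorem pvBL_lt (n : Nat) : n < 2 ^ pvBL n := by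
  have h := PySem.Int.lt_two_pow_bitLength (n : Int)
  simpa [pvBL] using h

theorem pvBL_le (n : Nat) (hn : n ≠ 0) : 2 ^ (pvBL n - 1) ≤ n := by
  have h := PySem.Int.two_pow_bitLength_le (n : Int) (by exact_mod_cast hn)
  simpa [pvBL] using h

theorem pvBL_pos (n : Nat) (hn : n ≠ 0) : 1 ≤ pvBL n := by
  by_contra h
  have h0 : pvBL n = 0 := by omega
  have := pvBL_lt n
  rw [h0] at this
  omega

-- A-side band term of B (with the Int k specialised to a Nat successor index)
def pvTerm (n : Nat) (k : Nat) : Int :=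
  (k : Int) * (min (n : Int) (2 ^ k - 1) - 2 ^ (k - 1) + 1)

-- the sums the two ports compute
def pvSA (t : Int) : Int :=
  ((PySem.List.pyRange 1 t 1).map (fun i => (PySem.Int.bitLength ((i + 1) - 1) : Int))).sum
def pvSB (n : Nat) : Int :=
  ((PySem.List.pyRange 1 ((pvBL n : Int) + 1) 1).map
    (fun k => k * (min (n : Int) (2 ^ k.toNat - 1) - 2 ^ (k - 1).toNat + 1))).sum

theorem pvSB_eq_range (n : Nat) :
    pvSB n = ((List.range (pvBL n)).map (fun j => pvTerm n (j + 1))).sum := by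
  unfold pvSB
  rw [PySem.List.pyRange_one]
  have : ((pvBL n : Int) + 1 - 1).toNat = pvBL n := by omega
  rw [this, List.map_map]
  congr 1
  apply List.map_congr_left
  intro j hj
  simp only [Function.comp, pvTerm]
  have h1 : (1 + (j : Int)).toNat = j + 1 := by omega
  have h2 : (1 + (j : Int) - 1).toNat = j := by omega
  rw [h1, h2]
  push_cast
  ring_nf

theorem pvSA_succ (m : Nat) :
    pvSA ((m : Int) + 1 + 1) = pvSA ((m : Int) + 1) + (pvBL (m + 1) : Int) := by
  unfold pvSA
  rw [PySem.List.pyRange_one_succ_right (by omega : (1 : Int) ≤ (m : Int) + 1)]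
  simp [pvBL]

-- each band k with 2^k - 1 ≤ n has a saturated min, so its term does not depend on n
theorem pvTerm_congr (n : Nat) (j : Nat) (hj : 2 ^ (j + 1) - 1 ≤ n) :
    pvTerm (n + 1) (j + 1) = pvTerm n (j + 1) := by
  unfold pvTerm
  have hone : (1 : Nat) ≤ 2 ^ (j + 1) := Nat.one_le_two_pow
  have hz : ((2 ^ (j + 1) - 1 : Nat) : Int) ≤ (n : Int) := by exact_mod_cast hj
  rw [Nat.cast_sub hone] at hz
  push_cast at hz
  have h1 : min ((n : Int) + 1) ((2 : Int) ^ (j + 1) - 1) = (2 : Int) ^ (j + 1) - 1 :=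
    min_eq_right (by linarith)
  have h2 : min ((n : Int)) ((2 : Int) ^ (j + 1) - 1) = (2 : Int) ^ (j + 1) - 1 :=
    min_eq_right (by linarith)
  simp only [Nat.add_sub_cancel]
  push_cast
  rw [h1, h2]

theorem pvSB_succ (n : Nat) : pvSB (n + 1) = pvSB n + (pvBL (n + 1) : Int) := by
  rw [pvSB_eq_range, pvSB_eq_range]
  by_cases hpow : n + 1 = 2 ^ pvBL n
  · -- a new band opens: pvBL (n+1) = pvBL n + 1
    have hL1 : pvBL (n + 1) = pvBL n + 1 := by
      have hlt : n + 1 < 2 ^ (pvBL n + 1) := by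
        have : (2 : Nat) ^ pvBL n < 2 ^ (pvBL n + 1) :=
          Nat.pow_lt_pow_right (by norm_num) (by omega)
        omega
      have hle : 2 ^ pvBL n ≤ n + 1 := by omega
      have h1 := pvBL_lt (n + 1)
      have h2 := pvBL_le (n + 1) (by omega)
      have h3 := pvBL_pos (n + 1) (by omega)
      set L := pvBL (n + 1) with hLdef
      by_contra hne
      rcases Nat.lt_or_ge L (pvBL n + 1) with h | h
      · have : 2 ^ L ≤ 2 ^ pvBL n := Nat.pow_le_pow_right (by norm_num) (by omega)
        omega
      · have : 2 ^ (pvBL n + 1) ≤ 2 ^ (L - 1) := Nat.pow_le_pow_right (by norm_num) (by omega)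
        omega
    rw [hL1, List.range_succ, List.map_append, List.sum_append]
    have hterms : ((List.range (pvBL n)).map (fun j => pvTerm (n + 1) (j + 1))).sum
        = ((List.range (pvBL n)).map (fun j => pvTerm n (j + 1))).sum := by
      congr 1
      apply List.map_congr_left
      intro j hj
      rw [List.mem_range] at hj
      apply pvTerm_congr
      have : 2 ^ (j + 1) ≤ 2 ^ pvBL n := Nat.pow_le_pow_right (by norm_num) (by omega)
      omega
    have hc : ((n : Int) + 1) = 2 ^ pvBL n := by exact_mod_cast hpow
    have hp : (1 : Int) ≤ 2 ^ pvBL n := one_le_pow₀ (by norm_num)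
    have h2 : (2 : Int) ^ (pvBL n + 1) = 2 * 2 ^ pvBL n := by ring
    have hmin : min ((n : Int) + 1) ((2 : Int) ^ (pvBL n + 1) - 1) = (n : Int) + 1 :=
      min_eq_left (by rw [hc]; linarith)
    have hnewterm : pvTerm (n + 1) (pvBL n + 1) = (pvBL n : Int) + 1 := by
      unfold pvTerm
      simp only [Nat.add_sub_cancel]
      push_cast
      rw [hmin, hc]
      ring
    rw [hterms]
    simp only [List.map_cons, List.map_nil, List.sum_cons, List.sum_nil]
    rw [hnewterm]
    push_cast
    ring
  · -- same band: pvBL (n+1) = pvBL n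
    have hlt : n + 1 < 2 ^ pvBL n := by
      have := pvBL_lt n
      omega
    have hn0 : n ≠ 0 := by
      intro h0
      subst h0
      have hz : pvBL 0 = 0 := by decide
      rw [hz] at hlt
      omega
    have hL1 : pvBL (n + 1) = pvBL n := by
      have hle : 2 ^ (pvBL n - 1) ≤ n + 1 := by
        have := pvBL_le n hn0
        omega
      have h1 := pvBL_lt (n + 1)
      have h2 := pvBL_le (n + 1) (by omega)
      have h3 := pvBL_pos (n + 1) (by omega)
      have h4 := pvBL_pos n hn0
      set L := pvBL (n + 1) with hLdef
      by_contra hne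
      rcases Nat.lt_or_ge L (pvBL n) with h | h
      · have : 2 ^ L ≤ 2 ^ (pvBL n - 1) := Nat.pow_le_pow_right (by norm_num) (by omega)
        omega
      · have : 2 ^ pvBL n ≤ 2 ^ (L - 1) := Nat.pow_le_pow_right (by norm_num) (by omega)
        omega
    rw [hL1]
    have h4 := pvBL_pos n hn0
    obtain ⟨M, hM⟩ : ∃ M, pvBL n = M + 1 := ⟨pvBL n - 1, by omega⟩
    rw [hM, List.range_succ, List.map_append, List.map_append, List.sum_append, List.sum_append]
    have hterms : ((List.range M).map (fun j => pvTerm (n + 1) (j + 1))).sum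
        = ((List.range M).map (fun j => pvTerm n (j + 1))).sum := by
      congr 1
      apply List.map_congr_left
      intro j hj
      rw [List.mem_range] at hj
      apply pvTerm_congr
      have h2le := pvBL_le n hn0
      have : 2 ^ (j + 1) ≤ 2 ^ (pvBL n - 1) := Nat.pow_le_pow_right (by norm_num) (by omega)
      omega
    have hcn : (n : Int) < 2 ^ (M + 1) := by
      have : n < 2 ^ (M + 1) := by rw [← hM]; exact pvBL_lt n
      exact_mod_cast this
    have hcn1 : ((n : Int) + 1) < 2 ^ (M + 1) := by
      have : n + 1 < 2 ^ (M + 1) := by rw [← hM]; exact hlt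
      exact_mod_cast this
    have hminn : min ((n : Int)) ((2 : Int) ^ (M + 1) - 1) = (n : Int) :=
      min_eq_left (by linarith)
    have hminn1 : min ((n : Int) + 1) ((2 : Int) ^ (M + 1) - 1) = (n : Int) + 1 :=
      min_eq_left (by linarith)
    rw [hterms, hL1] at *
    unfold pvTerm
    simp only [List.map_cons, List.map_nil, List.sum_cons, List.sum_nil, Nat.add_sub_cancel]
    push_cast
    rw [hminn, hminn1]
    ring

theorem pvMain (m : Nat) : pvSA ((m : Int) + 1) = pvSB m := by
  induction m with
  | zero =>
    decide
  | succ k ih =>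
    have h1 : ((k + 1 : Nat) : Int) + 1 = ((k : Int) + 1) + 1 := by push_cast; ring
    rw [h1, pvSA_succ, ih, pvSB_succ]

-- bridge: the two ports' loop sums agree for any upper bound t ≥ 1
theorem pvBridge (t : Int) (ht : 1 ≤ t) :
    ((PySem.List.pyRange 1 t 1).map (fun i => (PySem.Int.bitLength ((i + 1) - 1) : Int))).sum
    = ((PySem.List.pyRange 1 ((PySem.Int.bitLength (t - 1) : Int) + 1) 1).map
        (fun k => k * (min (t - 1) (2 ^ k.toNat - 1) - 2 ^ (k - 1).toNat + 1))).sum := by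
  obtain ⟨m, hm⟩ : ∃ m : Nat, t = (m : Int) + 1 := ⟨(t - 1).toNat, by omega⟩
  subst hm
  have h := pvMain m
  unfold pvSA pvSB pvBL at h
  have hm1 : (m : Int) + 1 - 1 = (m : Int) := by ring
  rw [hm1]
  exact h

-- ===== VERDICT (by name: the statement is the Claim_ definition above) =====
theorem needed_clean_bits_py_spec : Claim_equal_needed_clean_bits_py := by
  intro length ws _
  show needed_clean_bits_py length ws = needed_clean_bits_py_alt length ws
  cases ws
  · unfold needed_clean_bits_py needed_clean_bits_py_alt
    simp only [Bool.false_eq_true, if_false]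
    have ha : (PySem.Int.bitLength (PySem.Str.len ("abcdefghijklmnopqrstuvwxyz" ++ "ABCDEFGHIJKLMNOPQRSTUVWXYZ" ++ "0123456789" ++ "") - 1) : Int) = 6 := by decide
    rw [ha]
    rw [PySem.List.foldl_add, PySem.List.foldl_add]
    have h3 : (3 : Int) + 0 = 3 := by ring
    rw [h3]
    rw [pvBridge (max length 3) (by omega : (1:Int) ≤ max length 3)]
  · unfold needed_clean_bits_py needed_clean_bits_py_alt
    simp only [if_true]
    have ha : (PySem.Int.bitLength (PySem.Str.len ("abcdefghijklmnopqrstuvwxyz" ++ "ABCDEFGHIJKLMNOPQRSTUVWXYZ" ++ "0123456789" ++ "!@#$&_-?") - 1) : Int) = 7 := by decide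
    rw [ha]
    rw [PySem.List.foldl_add, PySem.List.foldl_add]
    have h4 : (3 : Int) + 1 = 4 := by ring
    rw [h4]
    rw [pvBridge (max length 4) (by omega : (1:Int) ≤ max length 4)]
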